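-- pv_equiv track=rewrite | github.com/9600dev/llmvm | helpers/helpers.py | extract_context
-- ===== SOURCE A (Python) =====
-- def extract_context(s, start, end, stop_tokens=['\n', '.', '?', '!']):
--     def capture(s, stop_tokens, backwards=False):
--         if backwards:
--             for i in range(len(s) - 1, -1, -1):
--                 if s[i] in stop_tokens:
--                     return s[i + 1:]
--             return s
--         else:
--             for i in range(0, len(s)):
--                 if s[i] in stop_tokens:
--                     return s[:i]
--             return s
--
--     if end == '\n' and '\n' not in s:
--         s += '\n'
--
--     left_of_start = s.split(start)[0]
--     right_of_end = s.split(end)[-1]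
--     return str(capture(left_of_start, stop_tokens, backwards=True)) + str(capture(right_of_end, stop_tokens))
-- ===== SOURCE B (Python) =====
-- def extract_context(s, start, end, stop_tokens=['\n', '.', '?', '!']):
--     # Token-directed rewrite: instead of scanning the text char by char, scan the
--     # (single-char) stop tokens and use str.rfind / str.find to locate the cut points.
--     if end == '\n' and '\n' not in s:
--         s += '\n'
--     left = s.split(start)[0]
--     right = s.split(end)[-1]
--     stops = [t for t in stop_tokens if len(t) == 1]
--     cut = max((left.rfind(c) for c in stops), default=-1)
--     lo = min((i for i in (right.find(c) for c in stops) if i != -1), default=len(right))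
--     return left[cut + 1:] + right[:lo]
-- ===== Notes on version B (the rewrite author's own statement) =====
-- stated objective: idiomatic
-- what changed: Replaces the per-character backward/forward index scans of the text with str.rfind/str.find driven by the single-char stop tokens (max of rfinds / min of finds), slicing at the resulting cut points.
import Mathlib
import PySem

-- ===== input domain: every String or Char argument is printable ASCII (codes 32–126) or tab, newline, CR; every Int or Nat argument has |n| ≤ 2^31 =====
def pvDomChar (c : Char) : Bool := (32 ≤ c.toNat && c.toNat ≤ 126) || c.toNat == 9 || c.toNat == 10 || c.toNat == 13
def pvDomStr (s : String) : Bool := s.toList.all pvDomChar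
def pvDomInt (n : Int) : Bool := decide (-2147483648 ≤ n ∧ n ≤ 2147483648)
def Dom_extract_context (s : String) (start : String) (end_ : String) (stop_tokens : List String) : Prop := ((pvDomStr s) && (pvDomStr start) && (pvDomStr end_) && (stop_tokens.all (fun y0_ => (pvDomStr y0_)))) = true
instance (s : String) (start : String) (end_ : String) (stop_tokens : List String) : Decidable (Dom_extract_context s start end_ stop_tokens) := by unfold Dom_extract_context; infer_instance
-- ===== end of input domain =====

-- B replaces A's per-character backward/forward scans by str.rfind/str.find over the
-- single-char stop tokens (max of rfinds / min of finds) and slices at the cut points.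

-- ===== PORT A =====
-- capture(s, stop_tokens, backwards=True):  for i in range(len(s)-1, -1, -1): if s[i] in stop_tokens: return s[i+1:] ; return s
-- (pvCaptureBack cs st (i+1) performs the iteration with loop variable i; the call is with i = len(s))
def pvCaptureBack (cs : List Char) (stop_tokens : List String) : Nat → List Char
  | 0 => cs
  | i + 1 =>
    if String.ofList [PySem.List.pyGetD cs (i : Int) ' '] ∈ stop_tokens then
      PySem.List.slice cs (some ((i : Int) + 1)) none
    else
      pvCaptureBack cs stop_tokens i

-- capture(s, stop_tokens):  for i in range(0, len(s)): if s[i] in stop_tokens: return s[:i] ; return s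
def pvCaptureFwd (cs : List Char) (stop_tokens : List String) (i : Nat) : List Char :=
  if _h : i < cs.length then
    if String.ofList [PySem.List.pyGetD cs (i : Int) ' '] ∈ stop_tokens then
      PySem.List.slice cs none (some (i : Int))
    else
      pvCaptureFwd cs stop_tokens (i + 1)
  else cs
termination_by cs.length - i

def extract_context (s : String) (start : String) (end_ : String) (stop_tokens : List String) : String :=
  -- if end == '\n' and '\n' not in s: s += '\n'
  let cs := if end_ = "\n" ∧ PySem.Str.isIn "\n" s = false then s.toList ++ ['\n'] else s.toList
  -- left_of_start = s.split(start)[0]   (split raises on an empty separator: Pre_ excludes it)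
  let left := PySem.List.pyGetD ((PySem.Chars.split? cs start.toList).getD []) 0 []
  -- right_of_end = s.split(end)[-1]
  let right := PySem.List.pyGetD ((PySem.Chars.split? cs end_.toList).getD []) (-1) []
  String.ofList (pvCaptureBack left stop_tokens left.length ++ pvCaptureFwd right stop_tokens 0)

-- ===== PORT B =====
def extract_context_alt (s : String) (start : String) (end_ : String) (stop_tokens : List String) : String :=
  let cs := if end_ = "\n" ∧ PySem.Str.isIn "\n" s = false then s.toList ++ ['\n'] else s.toList
  let left := PySem.List.pyGetD ((PySem.Chars.split? cs start.toList).getD []) 0 []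
  let right := PySem.List.pyGetD ((PySem.Chars.split? cs end_.toList).getD []) (-1) []
  -- stops = [t for t in stop_tokens if len(t) == 1]
  let stops := stop_tokens.filter (fun t => PySem.Str.len t == 1)
  -- cut = max((left.rfind(c) for c in stops), default=-1)   (every rfind is ≥ -1)
  let cut := stops.foldl (fun m t => max m (PySem.Chars.rfind left t.toList)) (-1)
  -- lo = min((i for i in (right.find(c) for c in stops) if i != -1), default=len(right))
  let lo := stops.foldl
      (fun m t => if PySem.Chars.find right t.toList == -1 then m else min m (PySem.Chars.find right t.toList))
      ((right.length : Int))
  String.ofList (PySem.List.slice left (some (cut + 1)) none ++ PySem.List.slice right none (some lo))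

-- ===== PRECONDITION & SPEC =====
-- Python's str.split raises ValueError on an empty separator, in A and in B alike; Pre_ excludes exactly that.
def Pre_extract_context (s : String) (start : String) (end_ : String) (stop_tokens : List String) : Prop :=
  start ≠ "" ∧ end_ ≠ ""
instance (s : String) (start : String) (end_ : String) (stop_tokens : List String) : Decidable (Pre_extract_context s start end_ stop_tokens) := by unfold Pre_extract_context; infer_instance

def pvWitness_extract_context : String × String × String × List String :=
  ("The cat. And my dog barks! loudly", "dog", "!", ["\n", ".", "?", "!"])

def Spec_extract_context (s : String) (start : String) (end_ : String) (stop_tokens : List String) (out : String) : Prop := out = extract_context_alt s start end_ stop_tokens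
instance (s : String) (start : String) (end_ : String) (stop_tokens : List String) (out : String) : Decidable (Spec_extract_context s start end_ stop_tokens out) := by unfold Spec_extract_context; infer_instance

-- ===== CLAIM (what is proved, stated in full; the proofs are below) =====
def Claim_equal_extract_context : Prop := ∀ (s : String) (start : String) (end_ : String) (stop_tokens : List String), Dom_extract_context s start end_ stop_tokens → Pre_extract_context s start end_ stop_tokens → Spec_extract_context s start end_ stop_tokens (extract_context s start end_ stop_tokens)

-- ===== LEMMAS AND PROOFS =====

-- the membership test both programs make, as a Bool predicate on a character
def pvStopB (st : List String) (c : Char) : Bool := decide (String.ofList [c] ∈ st)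

lemma pvTakeWhile_not (l : List Char) (st : List String) :
    l.takeWhile (fun c => !pvStopB st c) = l.take (l.findIdx (pvStopB st)) := by
  rw [List.takeWhile_eq_take_findIdx_not]
  simp

lemma pvFwd_eq (cs : List Char) (st : List String) :
    ∀ n i, cs.length - i ≤ n →
      pvCaptureFwd cs st i = cs.take i ++ (cs.drop i).takeWhile (fun c => !pvStopB st c) := by
  intro n
  induction n with
  | zero =>
    intro i hi
    rw [pvCaptureFwd, dif_neg (by omega)]
    rw [List.take_of_length_le (by omega), List.drop_of_length_le (by omega)]
    simp
  | succ n ih =>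
    intro i hi
    rw [pvCaptureFwd]
    by_cases h : i < cs.length
    · rw [dif_pos h]
      have hget : PySem.List.pyGetD cs (i : Int) ' ' = cs[i] := by
        simp [PySem.List.pyGetD_natCast, List.getElem?_eq_getElem h]
      rw [hget]
      rw [List.drop_eq_getElem_cons h]
      by_cases hm : String.ofList [cs[i]] ∈ st
      · rw [if_pos hm]
        rw [List.takeWhile_cons_of_neg (by simp [pvStopB, hm])]
        simp [PySem.List.slice_to_natCast]
      · rw [if_neg hm]
        rw [ih (i+1) (by omega)]
        rw [List.takeWhile_cons_of_pos (by simp [pvStopB, hm])]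
        rw [List.take_succ_eq_append_getElem h, List.append_assoc]
        rfl
    · rw [dif_neg h]
      rw [List.take_of_length_le (by omega), List.drop_of_length_le (by omega)]
      simp

lemma pvBack_eq (cs : List Char) (st : List String) :
    ∀ i, i ≤ cs.length →
      pvCaptureBack cs st i = ((cs.take i).reverse.takeWhile (fun c => !pvStopB st c)).reverse ++ cs.drop i := by
  intro i
  induction i with
  | zero => intro _; simp [pvCaptureBack]
  | succ i ih =>
    intro hi
    have h : i < cs.length := by omega
    rw [pvCaptureBack]
    have hget : PySem.List.pyGetD cs (i : Int) ' ' = cs[i] := by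
      simp [PySem.List.pyGetD_natCast, List.getElem?_eq_getElem h]
    rw [hget]
    rw [List.take_succ_eq_append_getElem h, List.reverse_append, List.reverse_singleton,
      List.singleton_append]
    by_cases hm : String.ofList [cs[i]] ∈ st
    · rw [if_pos hm]
      rw [List.takeWhile_cons_of_neg (by simp [pvStopB, hm])]
      have : ((i : Int) + 1) = ((i + 1 : Nat) : Int) := by push_cast; ring
      rw [this, PySem.List.slice_from_natCast]
      simp
    · rw [if_neg hm]
      rw [ih (by omega)]
      rw [List.takeWhile_cons_of_pos (by simp [pvStopB, hm])]
      rw [List.reverse_cons, List.append_assoc, List.singleton_append,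
        ← List.drop_eq_getElem_cons h]

lemma pvSingleton_isPrefixOf (c : Char) (l : List Char) : [c].isPrefixOf l = true ↔ l.head? = some c := by
  rw [List.isPrefixOf_iff_prefix]
  constructor
  · rintro ⟨t, rfl⟩; rfl
  · intro h
    cases l with
    | nil => simp at h
    | cons a t => simp only [List.head?_cons, Option.some.injEq] at h; subst h; exact ⟨t, rfl⟩

lemma pvPrefixAt (s : List Char) (c : Char) (j : Nat) :
    [c].isPrefixOf (s.drop j) = true ↔ s[j]? = some c := by
  rw [pvSingleton_isPrefixOf, List.head?_drop]

lemma pvRfindGo_lt (s : List Char) (c : Char) (m : Nat)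
    (hm : ∀ i, m ≤ i → s[i]? ≠ some c) :
    ∀ j, PySem.Chars.rfind.go s [c] j < (m : Int) := by
  intro j
  induction j with
  | zero =>
    rw [PySem.Chars.rfind.go]
    by_cases h : [c].isPrefixOf s
    · rw [if_pos h]
      have h0 : s[0]? = some c := (pvPrefixAt s c 0).mp (by simpa using h)
      by_contra hc
      exact hm 0 (by omega) h0
    · rw [if_neg h]; omega
  | succ j ih =>
    rw [PySem.Chars.rfind.go]
    by_cases h : [c].isPrefixOf (s.drop (j+1))
    · rw [if_pos h]
      have h0 : s[j+1]? = some c := (pvPrefixAt s c (j+1)).mp h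
      have : ¬ (m ≤ j + 1) := fun hle => hm _ hle h0
      push_cast
      omega
    · rw [if_neg h]; exact ih

lemma pvRfindGo_ge (s : List Char) (c : Char) (i : Nat) (h : s[i]? = some c) :
    ∀ j, i ≤ j → (i : Int) ≤ PySem.Chars.rfind.go s [c] j := by
  intro j
  induction j with
  | zero =>
    intro hij
    have hi0 : i = 0 := by omega
    subst hi0
    rw [PySem.Chars.rfind.go, if_pos (by simpa using (pvPrefixAt s c 0).mpr h)]
    simp
  | succ j ih =>
    intro hij
    rw [PySem.Chars.rfind.go]
    by_cases hp : [c].isPrefixOf (s.drop (j+1))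
    · rw [if_pos hp]; push_cast; omega
    · rw [if_neg hp]
      have : i ≠ j + 1 := by rintro rfl; exact hp ((pvPrefixAt s c (j+1)).mpr h)
      exact ih (by omega)

lemma pvFoldlMax_le (l : List Int) (B : Int) :
    ∀ a, a ≤ B → (∀ x ∈ l, x ≤ B) → l.foldl max a ≤ B := by
  induction l with
  | nil => intro a ha _; simpa using ha
  | cons x xs ih =>
    intro a ha hl
    simp only [List.foldl_cons]
    exact ih _ (max_le ha (hl x List.mem_cons_self)) (fun y hy => hl y (List.mem_cons_of_mem _ hy))

lemma pvMinFold_le_init (f : String → Int) (l : List String) :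
    ∀ a, l.foldl (fun m t => if f t == -1 then m else min m (f t)) a ≤ a := by
  induction l with
  | nil => intro a; simp
  | cons x xs ih =>
    intro a
    simp only [List.foldl_cons]
    by_cases h : f x == -1
    · rw [if_pos h]; exact ih a
    · rw [if_neg h]; exact le_trans (ih _) (min_le_left _ _)

lemma pvMinFold_le (f : String → Int) (l : List String) (t : String) (ht : t ∈ l) (h : ¬ (f t == -1)) :
    ∀ a, l.foldl (fun m t => if f t == -1 then m else min m (f t)) a ≤ f t := by
  induction l with
  | nil => cases ht
  | cons x xs ih =>
    intro a
    simp only [List.foldl_cons]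
    rcases List.mem_cons.mp ht with rfl | hmem
    · rw [if_neg h]
      exact le_trans (pvMinFold_le_init f xs _) (min_le_right _ _)
    · by_cases hx : f x == -1
      · rw [if_pos hx]; exact ih hmem a
      · rw [if_neg hx]; exact ih hmem _

lemma pvMinFold_ge (f : String → Int) (l : List String) (B : Int)
    (hl : ∀ t ∈ l, ¬ (f t == -1) → B ≤ f t) :
    ∀ a, B ≤ a → B ≤ l.foldl (fun m t => if f t == -1 then m else min m (f t)) a := by
  induction l with
  | nil => intro a ha; simpa using ha
  | cons x xs ih =>
    intro a ha
    simp only [List.foldl_cons]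
    by_cases hx : f x == -1
    · rw [if_pos hx]
      exact ih (fun t h1 h2 => hl t (List.mem_cons_of_mem _ h1) h2) a ha
    · rw [if_neg hx]
      exact ih (fun t h1 h2 => hl t (List.mem_cons_of_mem _ h1) h2) _
        (le_min ha (hl x List.mem_cons_self hx))

-- a token of the filtered list is a singleton string whose character passes pvStopB

lemma pvStops_mem (st : List String) (t : String)
    (ht : t ∈ st.filter (fun t => PySem.Str.len t == 1)) :
    ∃ c, t.toList = [c] ∧ pvStopB st c = true := by
  rw [List.mem_filter] at ht
  obtain ⟨hmem, hlen⟩ := ht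
  rw [PySem.Str.len_eq] at hlen
  have : t.toList.length = 1 := by simp at hlen; exact_mod_cast hlen
  obtain ⟨c, hc⟩ := List.length_eq_one_iff.mp this
  refine ⟨c, hc, ?_⟩
  simp only [pvStopB, decide_eq_true_eq]
  rwa [← hc, String.ofList_toList]

lemma pvNoStopHigh (cs : List Char) (st : List String) (c : Char) (hc : pvStopB st c = true)
    (i : Nat) (hi : cs.length - cs.reverse.findIdx (pvStopB st) ≤ i) : cs[i]? ≠ some c := by
  intro hsome
  have hilen : i < cs.length := by
    by_contra h
    rw [List.getElem?_eq_none_iff.mpr (by omega)] at hsome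
    simp at hsome
  set k := cs.reverse.findIdx (pvStopB st) with hk
  have hkpos : 1 ≤ k := by omega
  have hj : cs.length - 1 - i < k := by omega
  have hfalse := List.not_of_lt_findIdx hj
  rw [List.getElem_reverse] at hfalse
  have : cs.length - 1 - (cs.length - 1 - i) = i := by omega
  simp only [this] at hfalse
  rw [List.getElem?_eq_getElem hilen] at hsome
  rw [Option.some_inj.mp hsome] at hfalse
  rw [hc] at hfalse
  exact Bool.noConfusion hfalse

lemma pvCut_eq (cs : List Char) (st : List String) :
    (st.filter (fun t => PySem.Str.len t == 1)).foldl
        (fun m t => max m (PySem.Chars.rfind cs t.toList)) (-1)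
      = (cs.length : Int) - (cs.reverse.findIdx (pvStopB st) : Int) - 1 := by
  set stops := st.filter (fun t => PySem.Str.len t == 1) with hstops
  set k := cs.reverse.findIdx (pvStopB st) with hk
  have hklen : k ≤ cs.length := le_trans List.findIdx_le_length (by simp)
  have hfold : stops.foldl (fun m t => max m (PySem.Chars.rfind cs t.toList)) (-1)
      = (stops.map (fun t => PySem.Chars.rfind cs t.toList)).foldl max (-1) := by
    rw [List.foldl_map]
  rw [hfold]
  apply le_antisymm
  · -- upper bound
    apply pvFoldlMax_le _ _ _ (by omega)
    intro x hx
    obtain ⟨t, ht, rfl⟩ := List.mem_map.mp hx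
    obtain ⟨c, hc, hstop⟩ := pvStops_mem st t ht
    rw [hc]
    have := pvRfindGo_lt cs c (cs.length - k) (fun i hi => pvNoStopHigh cs st c hstop i hi) cs.length
    have hcast : ((cs.length - k : Nat) : Int) = (cs.length : Int) - k := by
      push_cast [Nat.cast_sub hklen]; ring
    rw [hcast] at this
    show PySem.Chars.rfind.go cs [c] cs.length ≤ _
    omega
  · -- lower bound
    by_cases hkl : k < cs.length
    · have hrev : k < cs.reverse.length := by simpa using hkl
      have hstop : pvStopB st (cs.reverse[k]) = true := List.findIdx_getElem (w := hrev)
      set c0 := cs.reverse[k] with hc0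
      have hc0get : cs[cs.length - 1 - k]? = some c0 := by
        rw [hc0, List.getElem_reverse, List.getElem?_eq_getElem]
      have ht0 : String.ofList [c0] ∈ stops := by
        rw [hstops, List.mem_filter]
        constructor
        · simpa [pvStopB] using hstop
        · simp [PySem.Str.len_eq]
      have hx : PySem.Chars.rfind cs [c0] ∈ stops.map (fun t => PySem.Chars.rfind cs t.toList) := by
        apply List.mem_map.mpr
        exact ⟨String.ofList [c0], ht0, by simp⟩
      have hge : ((cs.length - 1 - k : Nat) : Int) ≤ PySem.Chars.rfind cs [c0] :=
        pvRfindGo_ge cs c0 _ hc0get cs.length (by omega)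
      have := (PySem.List.le_foldl_max (stops.map (fun t => PySem.Chars.rfind cs t.toList)) (-1)).2 _ hx
      have hcast : ((cs.length - 1 - k : Nat) : Int) = (cs.length : Int) - k - 1 := by omega
      omega
    · have hkeq : k = cs.length := by omega
      have := (PySem.List.le_foldl_max (stops.map (fun t => PySem.Chars.rfind cs t.toList)) (-1)).1
      rw [hkeq]
      omega

lemma pvLo_eq (cs : List Char) (st : List String) :
    (st.filter (fun t => PySem.Str.len t == 1)).foldl
        (fun m t => if PySem.Chars.find cs t.toList == -1 then m
                    else min m (PySem.Chars.find cs t.toList)) ((cs.length : Int))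
      = (cs.findIdx (pvStopB st) : Int) := by
  set stops := st.filter (fun t => PySem.Str.len t == 1) with hstops
  set j := cs.findIdx (pvStopB st) with hj
  have hjlen : j ≤ cs.length := List.findIdx_le_length
  apply le_antisymm
  · by_cases hjl : j < cs.length
    · have hstop : pvStopB st (cs[j]) = true := List.findIdx_getElem (w := hjl)
      have ht0 : String.ofList [cs[j]] ∈ stops := by
        rw [hstops, List.mem_filter]
        exact ⟨by simpa [pvStopB] using hstop, by simp [PySem.Str.len_eq]⟩
      have hmem : cs[j] ∈ cs := List.getElem_mem hjl
      have hne : PySem.Chars.find cs [cs[j]] ≠ -1 :=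
        (PySem.Chars.find_ne_neg_one_iff cs [cs[j]]).mpr ((List.singleton_infix_iff _ _).mpr hmem)
      have hle : PySem.Chars.find cs [cs[j]] ≤ (j : Int) := by
        have hnn : 0 ≤ PySem.Chars.find cs [cs[j]] := by
          rcases (PySem.Chars.neg_one_le_find cs [cs[j]]).lt_or_eq with h | h
          · omega
          · exact absurd h.symm hne
        obtain ⟨_, hmin⟩ := PySem.Chars.find_spec hnn
        by_contra hgt
        push Not at hgt
        have : j < (PySem.Chars.find cs [cs[j]]).toNat := by omega
        exact hmin j this ⟨cs.drop (j+1), by rw [List.singleton_append, ← List.drop_eq_getElem_cons hjl]⟩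
      have := pvMinFold_le (fun t => PySem.Chars.find cs t.toList) stops (String.ofList [cs[j]])
        ht0 (by simpa using hne) ((cs.length : Int))
      simp only [String.toList_ofList] at this
      omega
    · have hjeq : j = cs.length := by omega
      rw [hjeq]
      exact pvMinFold_le_init _ _ _
  · -- every contributing find is ≥ j, and the initial value len ≥ j
    apply pvMinFold_ge
    · intro t ht hne
      obtain ⟨c, hc, hstop⟩ := pvStops_mem st t ht
      rw [hc] at hne ⊢
      have hne' : PySem.Chars.find cs [c] ≠ -1 := by simpa using hne
      have hnn : 0 ≤ PySem.Chars.find cs [c] := by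
        rcases (PySem.Chars.neg_one_le_find cs [c]).lt_or_eq with h | h
        · omega
        · exact absurd h.symm hne'
      obtain ⟨hpre, _⟩ := PySem.Chars.find_spec hnn
      -- cs[find.toNat] = c, a stop char, so find.toNat cannot be < j
      have hhead : cs[(PySem.Chars.find cs [c]).toNat]? = some c := by
        rw [← List.head?_drop]
        obtain ⟨tl, htl⟩ := hpre
        rw [← htl]; rfl
      by_contra hlt
      push Not at hlt
      have hlt' : (PySem.Chars.find cs [c]).toNat < j := by omega
      have hfalse := List.not_of_lt_findIdx hlt'
      have hidx : (PySem.Chars.find cs [c]).toNat < cs.length := by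
        by_contra hge
        rw [List.getElem?_eq_none_iff.mpr (by omega)] at hhead
        simp at hhead
      rw [List.getElem?_eq_getElem hidx] at hhead
      have hcontr : pvStopB st c = false := by
        rw [← Option.some_inj.mp hhead]; exact hfalse
      rw [hstop] at hcontr
      exact Bool.noConfusion hcontr
    · omega

lemma pvBack_main (cs : List Char) (st : List String) :
    pvCaptureBack cs st cs.length =
      PySem.List.slice cs (some ((st.filter (fun t => PySem.Str.len t == 1)).foldl
        (fun m t => max m (PySem.Chars.rfind cs t.toList)) (-1) + 1)) none := by
  rw [pvBack_eq cs st cs.length le_rfl, List.take_length, List.drop_length, List.append_nil]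
  rw [pvTakeWhile_not, pvCut_eq]
  have hk : cs.reverse.findIdx (pvStopB st) ≤ cs.length :=
    le_trans List.findIdx_le_length (by simp)
  have hcast : (cs.length : Int) - (cs.reverse.findIdx (pvStopB st) : Int) - 1 + 1
      = ((cs.length - cs.reverse.findIdx (pvStopB st) : Nat) : Int) := by omega
  rw [hcast, PySem.List.slice_from_natCast]
  rw [List.reverse_take]
  simp

lemma pvFwd_main (cs : List Char) (st : List String) :
    pvCaptureFwd cs st 0 =
      PySem.List.slice cs none (some ((st.filter (fun t => PySem.Str.len t == 1)).foldl
        (fun m t => if PySem.Chars.find cs t.toList == -1 then m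
                    else min m (PySem.Chars.find cs t.toList)) ((cs.length : Int)))) := by
  rw [pvFwd_eq cs st cs.length 0 (by omega), List.take_zero, List.drop_zero, List.nil_append]
  rw [pvTakeWhile_not, pvLo_eq, PySem.List.slice_to_natCast]

-- ===== VERDICT (by name: the statement is the Claim_ definition above) =====
theorem extract_context_spec : Claim_equal_extract_context := by
  intro s start end_ stop_tokens _ _
  unfold Spec_extract_context extract_context extract_context_alt
  dsimp only
  rw [pvBack_main, pvFwd_main]
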